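-- pv_equiv track=rewrite | github.com/edwardisintou/MarioAIAgents | rule-based.py | nearest_object
-- ===== SOURCE A (Python) =====
-- def nearest_object(mario_position, enemy_position, pipe_position, hole_position, first_left_stair, first_right_stair, second_stair_location, last_stair_location, goal_position):
--     objects = []
--     locations = []
--
--     for object in enemy_position, pipe_position, hole_position, first_left_stair, first_right_stair, second_stair_location, last_stair_location, goal_position:
--         if object is not None:
--             objects.append(object)
--             location = object[0] - mario_position[0]
--             locations.append(location)
--
--     if len(objects) == 0:
--         return (0, 0)
--
--     return objects[locations.index(find_min_location(locations))]
--
-- def find_min_location(locations):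
--     min_location = max(locations)
--
--     for location in locations:
--         if location > 0:
--             if location < min_location:
--                 min_location = location
--
--     return min_location
-- ===== SOURCE B (Python) =====
-- def nearest_object(mario_position, enemy_position, pipe_position, hole_position, first_left_stair, first_right_stair, second_stair_location, last_stair_location, goal_position):
--     best = None
--     best_key = None
--     for obj in (enemy_position, pipe_position, hole_position, first_left_stair, first_right_stair, second_stair_location, last_stair_location, goal_position):
--         if obj is None:
--             continue
--         off = obj[0] - mario_position[0]
--         key = (0, off) if off > 0 else (1, -off)
--         if best is None or key < best_key:
--             best, best_key = obj, key
--     return (0, 0) if best is None else best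
-- ===== Notes on version B (the rewrite author's own statement) =====
-- stated objective: simpler
-- what changed: Single pass keeping the best candidate under the sort key (0,off) for off>0 else (1,-off), replacing A's parallel objects/locations lists plus a max scan, a min-positive scan and a .index rescan.
import Mathlib
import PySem

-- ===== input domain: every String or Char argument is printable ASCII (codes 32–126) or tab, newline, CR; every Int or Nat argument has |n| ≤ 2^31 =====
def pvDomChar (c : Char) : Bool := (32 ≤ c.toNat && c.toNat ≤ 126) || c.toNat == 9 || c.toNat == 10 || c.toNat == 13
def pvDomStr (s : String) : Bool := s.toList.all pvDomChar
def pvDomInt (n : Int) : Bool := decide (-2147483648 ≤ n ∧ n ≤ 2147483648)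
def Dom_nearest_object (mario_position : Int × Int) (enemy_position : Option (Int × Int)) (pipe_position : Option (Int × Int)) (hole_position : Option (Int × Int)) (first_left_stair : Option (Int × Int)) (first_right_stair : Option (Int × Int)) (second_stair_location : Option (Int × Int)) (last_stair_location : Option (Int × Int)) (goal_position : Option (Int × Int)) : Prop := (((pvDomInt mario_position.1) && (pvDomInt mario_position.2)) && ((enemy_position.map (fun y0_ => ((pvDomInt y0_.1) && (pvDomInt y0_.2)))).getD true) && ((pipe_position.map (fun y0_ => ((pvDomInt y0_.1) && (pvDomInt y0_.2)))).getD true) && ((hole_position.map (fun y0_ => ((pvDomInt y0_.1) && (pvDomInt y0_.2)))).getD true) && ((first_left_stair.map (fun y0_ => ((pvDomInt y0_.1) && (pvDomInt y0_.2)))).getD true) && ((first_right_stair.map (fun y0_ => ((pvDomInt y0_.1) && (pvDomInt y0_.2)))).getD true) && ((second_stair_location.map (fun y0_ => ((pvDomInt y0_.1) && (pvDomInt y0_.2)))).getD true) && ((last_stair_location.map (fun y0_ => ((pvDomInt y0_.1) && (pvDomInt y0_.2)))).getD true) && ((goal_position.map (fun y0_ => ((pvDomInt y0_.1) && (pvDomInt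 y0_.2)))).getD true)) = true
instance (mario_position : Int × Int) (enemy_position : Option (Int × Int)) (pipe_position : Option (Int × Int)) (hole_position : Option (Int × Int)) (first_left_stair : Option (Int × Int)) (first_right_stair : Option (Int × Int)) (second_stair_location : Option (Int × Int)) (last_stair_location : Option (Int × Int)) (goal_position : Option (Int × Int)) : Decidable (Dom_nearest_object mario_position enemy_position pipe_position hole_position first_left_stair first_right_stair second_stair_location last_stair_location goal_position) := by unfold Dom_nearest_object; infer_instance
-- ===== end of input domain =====

-- B replaces A's parallel lists + max/min-positive/.index rescans by one pass keeping the best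
-- candidate under the key (0,off) if off>0 else (1,-off); objective: simpler. Both are total.

-- ===== PORT A =====
-- helper find_min_location, transliterated: min_location = max(locations); then take any positive
-- location strictly below the running value.  Python's max([]) raises; A only calls this on a
-- nonempty list, so the `none` branch below is unreachable in A's use.
def find_min_location (locations : List Int) : Int :=
  match PySem.List.max? locations (fun x => x) with
  | none => 0
  | some m0 =>
    locations.foldl
      (fun min_location location =>
        if location > 0 then (if location < min_location then location else min_location)
        else min_location) m0

-- A's body over the candidate list (the Python for-loop over the 8-tuple): build objects and
-- locations, then objects[locations.index(find_min_location(locations))].  index cannot fail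
-- (the value is taken from the list) and the index is in range, so the defaults are unreachable.
def pvACore (mx : Int) (cands : List (Option (Int × Int))) : Int × Int :=
  let st := cands.foldl
    (fun (st : List (Int × Int) × List Int) o =>
      match o with
      | none => st
      | some obj => (st.1 ++ [obj], st.2 ++ [obj.1 - mx])) ([], [])
  if st.1.length = 0 then (0, 0)
  else
    match PySem.List.index? st.2 (find_min_location st.2) with
    | none => (0, 0)
    | some i => (PySem.List.pyGet? st.1 (i : Int)).getD (0, 0)

def nearest_object (mario_position : Int × Int) (enemy_position : Option (Int × Int)) (pipe_position : Option (Int × Int)) (hole_position : Option (Int × Int)) (first_left_stair : Option (Int × Int)) (first_right_stair : Option (Int × Int)) (second_stair_location : Option (Int × Int)) (last_stair_location : Option (Int × Int)) (goal_position : Option (Int × Int)) : Int × Int :=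
  pvACore mario_position.1 [enemy_position, pipe_position, hole_position, first_left_stair, first_right_stair, second_stair_location, last_stair_location, goal_position]

-- ===== PORT B =====
-- Python tuple key and tuple '<' (lexicographic on the pair)
def pvKey (off : Int) : Int × Int := if off > 0 then (0, off) else (1, -off)

def pvKeyLt (a b : Int × Int) : Bool := a.1 < b.1 || (a.1 == b.1 && a.2 < b.2)

-- the loop body of Source B for a non-None obj: replace the best on a strictly smaller key
def pvStepB (mx : Int) (best : Option ((Int × Int) × (Int × Int))) (obj : Int × Int) : Option ((Int × Int) × (Int × Int)) :=
  let key := pvKey (obj.1 - mx)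
  match best with
  | none => some (obj, key)
  | some b => if pvKeyLt key b.2 then some (obj, key) else best

def pvBCore (mx : Int) (cands : List (Option (Int × Int))) : Int × Int :=
  match cands.foldl
      (fun best o =>
        match o with
        | none => best
        | some obj => pvStepB mx best obj) none with
  | none => (0, 0)
  | some b => b.1

def nearest_object_alt (mario_position : Int × Int) (enemy_position : Option (Int × Int)) (pipe_position : Option (Int × Int)) (hole_position : Option (Int × Int)) (first_left_stair : Option (Int × Int)) (first_right_stair : Option (Int × Int)) (second_stair_location : Option (Int × Int)) (last_stair_location : Option (Int × Int)) (goal_position : Option (Int × Int)) : Int × Int :=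
  pvBCore mario_position.1 [enemy_position, pipe_position, hole_position, first_left_stair, first_right_stair, second_stair_location, last_stair_location, goal_position]

-- ===== PRECONDITION & SPEC =====
def Spec_nearest_object (mario_position : Int × Int) (enemy_position : Option (Int × Int)) (pipe_position : Option (Int × Int)) (hole_position : Option (Int × Int)) (first_left_stair : Option (Int × Int)) (first_right_stair : Option (Int × Int)) (second_stair_location : Option (Int × Int)) (last_stair_location : Option (Int × Int)) (goal_position : Option (Int × Int)) (out : Int × Int) : Prop := out = nearest_object_alt mario_position enemy_position pipe_position hole_position first_left_stair first_right_stair second_stair_location last_stair_location goal_position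
instance (mario_position : Int × Int) (enemy_position : Option (Int × Int)) (pipe_position : Option (Int × Int)) (hole_position : Option (Int × Int)) (first_left_stair : Option (Int × Int)) (first_right_stair : Option (Int × Int)) (second_stair_location : Option (Int × Int)) (last_stair_location : Option (Int × Int)) (goal_position : Option (Int × Int)) (out : Int × Int) : Decidable (Spec_nearest_object mario_position enemy_position pipe_position hole_position first_left_stair first_right_stair second_stair_location last_stair_location goal_position out) := by unfold Spec_nearest_object; infer_instance

-- ===== CLAIM (what is proved, stated in full; the proofs are below) =====
def Claim_equal_nearest_object : Prop := ∀ (mario_position : Int × Int) (enemy_position : Option (Int × Int)) (pipe_position : Option (Int × Int)) (hole_position : Option (Int × Int)) (first_left_stair : Option (Int × Int)) (first_right_stair : Option (Int × Int)) (second_stair_location : Option (Int × Int)) (last_stair_location : Option (Int × Int)) (goal_position : Option (Int × Int)), Dom_nearest_object mario_position enemy_position pipe_position hole_position first_left_stair first_right_stair second_stair_location last_stair_location goal_position → Spec_nearest_object mario_position enemy_position pipe_position hole_position first_left_stair first_right_stair second_stair_location last_stair_location goal_position (nearest_object mario_position enemy_position pipe_position hole_position first_left_stair first_right_stair second_stair_location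 last_stair_location goal_position)

-- ===== LEMMAS AND PROOFS =====

-- A's accumulation loop: objects = the non-None candidates, locations = their offsets
theorem pvCollect_eq (mx : Int) : ∀ (cands : List (Option (Int × Int))) (acc : List (Int × Int)),
    cands.foldl
      (fun (st : List (Int × Int) × List Int) o =>
        match o with
        | none => st
        | some obj => (st.1 ++ [obj], st.2 ++ [obj.1 - mx])) (acc, acc.map (fun p => p.1 - mx))
    = (acc ++ cands.filterMap id, (acc ++ cands.filterMap id).map (fun p => p.1 - mx)) := by
  intro cands
  induction cands with
  | nil => intro acc; simp
  | cons o t ih =>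
    intro acc
    match o with
    | none => simpa using ih acc
    | some obj =>
      have := ih (acc ++ [obj])
      simp only [List.map_append] at this
      simpa [List.append_assoc] using this

-- B's loop skips None: it is the plain fold over the non-None candidates
theorem pvFoldB_filterMap (mx : Int) : ∀ (cands : List (Option (Int × Int)))
    (acc : Option ((Int × Int) × (Int × Int))),
    cands.foldl
      (fun best o =>
        match o with
        | none => best
        | some obj => pvStepB mx best obj) acc
    = (cands.filterMap id).foldl (pvStepB mx) acc := by
  intro cands
  induction cands with
  | nil => intro acc; simp
  | cons o t ih => intro acc; cases o <;> simp [ih]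

theorem pvKey_trichotomy (a b : Int) :
    a = b ∨ pvKeyLt (pvKey a) (pvKey b) = true ∨ pvKeyLt (pvKey b) (pvKey a) = true := by
  unfold pvKey pvKeyLt
  split_ifs <;> simp <;> omega

-- invariant of A's min-positive scan
theorem pvMinScan_inv : ∀ (l : List Int) (a : Int),
    (l.foldl
      (fun min_location location =>
        if location > 0 then (if location < min_location then location else min_location)
        else min_location) a) ≤ a
    ∧ ((l.foldl
      (fun min_location location =>
        if location > 0 then (if location < min_location then location else min_location)
        else min_location) a) = a
        ∨ ((l.foldl
      (fun min_location location =>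
        if location > 0 then (if location < min_location then location else min_location)
        else min_location) a) ∈ l ∧ 0 < (l.foldl
      (fun min_location location =>
        if location > 0 then (if location < min_location then location else min_location)
        else min_location) a)))
    ∧ (∀ x ∈ l, 0 < x → (l.foldl
      (fun min_location location =>
        if location > 0 then (if location < min_location then location else min_location)
        else min_location) a) ≤ x) := by
  intro l
  induction l with
  | nil => intro a; simp
  | cons y t ih =>
    intro a
    simp only [List.foldl_cons]
    by_cases hy : y > 0
    · by_cases hlt : y < a
      · have h := ih y
        simp only [if_pos hy, if_pos hlt]
        refine ⟨by omega, ?_, ?_⟩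
        · rcases h.2.1 with h' | h'
          · exact Or.inr ⟨by simp [h'], by omega⟩
          · exact Or.inr ⟨by simp [h'.1], h'.2⟩
        · intro x hx hxp
          rcases List.mem_cons.mp hx with rfl | hx
          · exact h.1
          · exact h.2.2 x hx hxp
      · have h := ih a
        simp only [if_pos hy, if_neg hlt]
        refine ⟨h.1, ?_, ?_⟩
        · rcases h.2.1 with h' | h'
          · exact Or.inl h'
          · exact Or.inr ⟨List.mem_cons_of_mem _ h'.1, h'.2⟩
        · intro x hx hxp
          rcases List.mem_cons.mp hx with rfl | hx
          · omega
          · exact h.2.2 x hx hxp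
    · have h := ih a
      simp only [if_neg hy]
      refine ⟨h.1, ?_, ?_⟩
      · rcases h.2.1 with h' | h'
        · exact Or.inl h'
        · exact Or.inr ⟨List.mem_cons_of_mem _ h'.1, h'.2⟩
      · intro x hx hxp
        rcases List.mem_cons.mp hx with rfl | hx
        · omega
        · exact h.2.2 x hx hxp

-- key comparison spelled out arithmetically
theorem pvKeyLt_key_iff (x r : Int) :
    pvKeyLt (pvKey x) (pvKey r) = true ↔
      ((0 < x ∧ ¬ 0 < r) ∨ (0 < x ∧ 0 < r ∧ x < r) ∨ (¬ 0 < x ∧ ¬ 0 < r ∧ r < x)) := by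
  unfold pvKey pvKeyLt
  split_ifs <;> simp <;> omega

-- find_min_location picks a member whose key is minimal
theorem pvFindMin_spec (l : List Int) (h : l ≠ []) :
    find_min_location l ∈ l ∧ ∀ x ∈ l, pvKeyLt (pvKey x) (pvKey (find_min_location l)) = false := by
  obtain ⟨M, hM⟩ : ∃ M, PySem.List.max? l (fun x => x) = some M := by
    cases hmx : PySem.List.max? l (fun x => x) with
    | none => exact absurd ((PySem.List.max?_eq_none_iff _ _).mp hmx) h
    | some M => exact ⟨M, rfl⟩
  have hMmax : ∀ y ∈ l, y ≤ M := fun y hy => PySem.List.max?_isMax hM y hy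
  have hMmem : M ∈ l := PySem.List.max?_mem hM
  have key : ∀ r : Int, r ≤ M → (r = M ∨ (r ∈ l ∧ 0 < r)) → (∀ x ∈ l, 0 < x → r ≤ x) →
      r ∈ l ∧ ∀ x ∈ l, pvKeyLt (pvKey x) (pvKey r) = false := by
    intro r _ h2 h3
    refine ⟨?_, ?_⟩
    · rcases h2 with rfl | h'
      · exact hMmem
      · exact h'.1
    · intro x hx
      have h3x := h3 x hx
      have hxM := hMmax x hx
      cases hb : pvKeyLt (pvKey x) (pvKey r) with
      | false => rfl
      | true =>
        exfalso
        have hd := (pvKeyLt_key_iff x r).mp hb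
        rcases hd with ⟨hx1, hr1⟩ | ⟨hx1, hr1, hlt⟩ | ⟨hx1, hr1, hlt⟩
        · rcases h2 with rfl | h2 <;> omega
        · have := h3x hx1; omega
        · rcases h2 with rfl | h2 <;> omega
  have hinv := pvMinScan_inv l M
  unfold find_min_location
  rw [hM]
  exact key _ hinv.1 hinv.2.1 hinv.2.2

-- once the best holds an unbeatable key, the fold keeps it
theorem pvFoldB_noBeat (mx : Int) : ∀ (objs : List (Int × Int)) (b : (Int × Int) × (Int × Int)),
    (∀ x ∈ objs, pvKeyLt (pvKey (x.1 - mx)) b.2 = false) →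
    objs.foldl (pvStepB mx) (some b) = some b := by
  intro objs
  induction objs with
  | nil => intro b _; rfl
  | cons p t ih =>
    intro b hb
    have hp := hb p (by simp)
    simp only [List.foldl_cons, pvStepB, hp]
    exact ih b (fun x hx => hb x (List.mem_cons_of_mem _ hx))

-- the fold returns the first element achieving the minimal key
theorem pvFoldB_char (mx : Int) : ∀ (objs : List (Int × Int)) (m : Int),
    m ∈ objs.map (fun p => p.1 - mx) →
    (∀ x ∈ objs.map (fun p => p.1 - mx), pvKeyLt (pvKey x) (pvKey m) = false) →
    (objs.foldl (pvStepB mx) none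
        = (objs.find? (fun p => p.1 - mx == m)).map (fun p => (p, pvKey (p.1 - mx)))
      ∧ ∀ b : (Int × Int) × (Int × Int), b.2 = pvKey (b.1.1 - mx) →
          pvKeyLt (pvKey m) b.2 = true →
          objs.foldl (pvStepB mx) (some b)
            = (objs.find? (fun p => p.1 - mx == m)).map (fun p => (p, pvKey (p.1 - mx)))) := by
  intro objs
  induction objs with
  | nil => intro m hm _; simp at hm
  | cons p t ih =>
    intro m hm hmin
    by_cases hfp : p.1 - mx = m
    · -- head achieves the minimum: it is taken and never replaced
      have hkeep : t.foldl (pvStepB mx) (some (p, pvKey (p.1 - mx))) = some (p, pvKey (p.1 - mx)) := by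
        apply pvFoldB_noBeat
        intro x hx
        show pvKeyLt (pvKey (x.1 - mx)) (pvKey (p.1 - mx)) = false
        rw [hfp]
        exact hmin (x.1 - mx) (List.mem_map.mpr ⟨x, List.mem_cons_of_mem p hx, rfl⟩)
      have hfind : (p :: t).find? (fun q => q.1 - mx == m) = some p :=
        List.find?_cons_of_pos (by simp [hfp])
      refine ⟨?_, ?_⟩
      · rw [List.foldl_cons,
          show pvStepB mx none p = some (p, pvKey (p.1 - mx)) from rfl, hkeep, hfind]
        rfl
      · intro b hb hbt
        have hcond : pvKeyLt (pvKey (p.1 - mx)) b.2 = true := by rw [hfp]; exact hbt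
        rw [List.foldl_cons,
          show pvStepB mx (some b) p = some (p, pvKey (p.1 - mx)) by
            simp [pvStepB, hcond], hkeep, hfind]
        rfl
    · -- head does not achieve the minimum
      have hmt : m ∈ t.map (fun q => q.1 - mx) := by
        rw [List.map_cons, List.mem_cons] at hm
        rcases hm with h' | h'
        · exact absurd h'.symm hfp
        · exact h'
      have hmint : ∀ x ∈ t.map (fun q => q.1 - mx), pvKeyLt (pvKey x) (pvKey m) = false := by
        intro x hx
        exact hmin x (by rw [List.map_cons]; exact List.mem_cons_of_mem _ hx)
      have hIH := ih m hmt hmint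
      have hmp : pvKeyLt (pvKey m) (pvKey (p.1 - mx)) = true := by
        rcases pvKey_trichotomy m (p.1 - mx) with h' | h' | h'
        · exact absurd h'.symm hfp
        · exact h'
        · have hfalse := hmin (p.1 - mx) (List.mem_map.mpr ⟨p, List.mem_cons_self, rfl⟩)
          rw [h'] at hfalse
          exact absurd hfalse (by simp)
      have hfind : (p :: t).find? (fun q => q.1 - mx == m) = t.find? (fun q => q.1 - mx == m) :=
        List.find?_cons_of_neg (by simp [hfp])
      refine ⟨?_, ?_⟩
      · rw [List.foldl_cons,
          show pvStepB mx none p = some (p, pvKey (p.1 - mx)) from rfl, hfind]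
        exact hIH.2 (p, pvKey (p.1 - mx)) rfl hmp
      · intro b hb hbt
        rw [List.foldl_cons, hfind]
        by_cases htake : pvKeyLt (pvKey (p.1 - mx)) b.2 = true
        · rw [show pvStepB mx (some b) p = some (p, pvKey (p.1 - mx)) by simp [pvStepB, htake]]
          exact hIH.2 (p, pvKey (p.1 - mx)) rfl hmp
        · rw [show pvStepB mx (some b) p = some b by
            simp only [pvStepB]; rw [if_neg htake]]
          exact hIH.2 b hb hbt

-- A's objects[locations.index m] is the first object whose offset is m
theorem pvIndexA (mx : Int) : ∀ (objs : List (Int × Int)) (m : Int) (k : Nat),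
    PySem.List.index? (objs.map (fun p => p.1 - mx)) m = some k →
    objs[k]? = objs.find? (fun p => p.1 - mx == m) := by
  intro objs
  induction objs with
  | nil => intro m k h; simp [PySem.List.index?_eq_idxOf?] at h
  | cons p t ih =>
    intro m k h
    by_cases hfp : p.1 - mx = m
    · rw [List.map_cons, hfp, PySem.List.index?_cons_self] at h
      cases h
      rw [List.find?_cons_of_pos (by simp [hfp])]
      rfl
    · rw [List.map_cons, PySem.List.index?_cons_of_ne _ hfp] at h
      cases hk' : PySem.List.index? (t.map (fun p => p.1 - mx)) m with
      | none => rw [hk'] at h; simp at h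
      | some k' =>
        rw [hk'] at h
        simp only [Option.map_some, Option.some.injEq] at h
        subst h
        rw [List.find?_cons_of_neg (by simp [hfp]), List.getElem?_cons_succ]
        exact ih m k' hk'

-- the generic cores agree
theorem pvCore_eq (mx : Int) (cands : List (Option (Int × Int))) :
    pvACore mx cands = pvBCore mx cands := by
  unfold pvACore pvBCore
  have hcol := pvCollect_eq mx cands []
  simp only [List.map_nil, List.nil_append] at hcol
  simp only [pvFoldB_filterMap, hcol]
  set objs := cands.filterMap id with hobjs
  by_cases hne : objs = []
  · simp [hne]
  · have hlocne : objs.map (fun p => p.1 - mx) ≠ [] := by simp [hne]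
    obtain ⟨hmmem, hmmin⟩ := pvFindMin_spec (objs.map (fun p => p.1 - mx)) hlocne
    set m := find_min_location (objs.map (fun p => p.1 - mx)) with hm
    obtain ⟨k, hk⟩ : ∃ k, PySem.List.index? (objs.map (fun p => p.1 - mx)) m = some k := by
      cases hidx : PySem.List.index? (objs.map (fun p => p.1 - mx)) m with
      | none => exact absurd hmmem ((PySem.List.index?_eq_none_iff _ _).mp hidx)
      | some k => exact ⟨k, rfl⟩
    have hA := pvIndexA mx objs m k hk
    obtain ⟨w, hw, hwm⟩ := List.mem_map.mp hmmem
    obtain ⟨v, hv⟩ : ∃ v, objs.find? (fun p => p.1 - mx == m) = some v := by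
      cases hf : objs.find? (fun p => p.1 - mx == m) with
      | none =>
        have := List.find?_eq_none.mp hf w hw
        simp [hwm] at this
      | some v => exact ⟨v, rfl⟩
    have hB := (pvFoldB_char mx objs m hmmem hmmin).1
    rw [if_neg (by simpa using hne), hk, hB, hv]
    show (PySem.List.pyGet? objs ((k : Nat) : Int)).getD (0, 0) = v
    rw [PySem.List.pyGet?_natCast, hA, hv]
    rfl

-- ===== VERDICT (by name: the statement is the Claim_ definition above) =====
theorem nearest_object_spec : Claim_equal_nearest_object := by
  intro mario_position enemy_position pipe_position hole_position first_left_stair first_right_stair second_stair_location last_stair_location goal_position _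
  unfold Spec_nearest_object nearest_object nearest_object_alt
  exact pvCore_eq _ _
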